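-- pv_equiv track=rewrite | github.com/HenryScratch/rzd_bot | cupe.py | find_free_coupes
-- ===== SOURCE A (Python) =====
-- def find_free_coupes(free_seats, total_seats=36):
--     seats_per_coupe = 4
--     free_seats_set = set(free_seats)
--
--     # Списки для купе с 4, 3 и 2 свободными местами
--     fully_free_coupes = []
--     three_free_coupes = []
--     two_free_coupes = []
--
--     # Проверяем каждое купе
--     for coupe_num in range(total_seats // seats_per_coupe):
--         # Номера мест в текущем купе
--         start_seat = coupe_num * seats_per_coupe + 1
--         coupe_seats = {start_seat + i for i in range(seats_per_coupe)}
--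
--         # Находим пересечение свободных мест с местами в купе
--         free_in_coupe = coupe_seats.intersection(free_seats_set)
--         free_count = len(free_in_coupe)
--
--         # Определяем тип купе по количеству свободных мест
--         if free_count == 4:
--             fully_free_coupes.append(coupe_num + 1)
--         elif free_count == 3:
--             three_free_coupes.append(coupe_num + 1)
--         elif free_count == 2:
--             two_free_coupes.append(coupe_num + 1)
--
--     # Возвращаем списки купе по количеству свободных мест
--     return fully_free_coupes, three_free_coupes, two_free_coupes
-- ===== SOURCE B (Python) =====
-- def find_free_coupes(free_seats, total_seats=36):
--     num_coupes = total_seats // 4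
--     counts = {}
--     for seat in set(free_seats):
--         if 1 <= seat <= num_coupes * 4:
--             c = (seat - 1) // 4
--             counts[c] = counts.get(c, 0) + 1
--     fully_free_coupes = []
--     three_free_coupes = []
--     two_free_coupes = []
--     for coupe_num in range(num_coupes):
--         n = counts.get(coupe_num, 0)
--         if n == 4:
--             fully_free_coupes.append(coupe_num + 1)
--         elif n == 3:
--             three_free_coupes.append(coupe_num + 1)
--         elif n == 2:
--             two_free_coupes.append(coupe_num + 1)
--     return fully_free_coupes, three_free_coupes, two_free_coupes
-- ===== Notes on version B (the rewrite author's own statement) =====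
-- stated objective: alternative
-- what changed: A intersects each coupe's 4-seat set with the free-seat set per coupe; B makes a single tally pass over the distinct free seats building a dict of per-coupe counts, then a single classification pass over the coupes.
import Mathlib
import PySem

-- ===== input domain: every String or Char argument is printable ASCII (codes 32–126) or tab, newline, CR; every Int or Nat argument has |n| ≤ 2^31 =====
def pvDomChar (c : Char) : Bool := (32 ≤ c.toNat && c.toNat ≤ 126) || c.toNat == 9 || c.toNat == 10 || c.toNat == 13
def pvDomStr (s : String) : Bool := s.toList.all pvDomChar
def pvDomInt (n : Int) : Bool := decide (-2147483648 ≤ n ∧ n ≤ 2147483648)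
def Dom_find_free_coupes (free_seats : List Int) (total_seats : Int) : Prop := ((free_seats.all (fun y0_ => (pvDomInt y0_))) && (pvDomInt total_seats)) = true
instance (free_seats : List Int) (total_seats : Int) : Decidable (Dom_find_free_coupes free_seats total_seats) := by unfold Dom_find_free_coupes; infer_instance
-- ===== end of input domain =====

-- B replaces A's per-coupe set intersections by one tally pass over the distinct free seats
-- (a dict of per-coupe counts) followed by one classification pass (objective: alternative decomposition).

-- ===== PORT A =====
def find_free_coupes (free_seats : List Int) (total_seats : Int) : List Int × List Int × List Int :=
  let seats_per_coupe : Int := 4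
  let free_seats_set : PySem.Set Int := PySem.Set.ofList free_seats
  (PySem.List.pyRange 0 (PySem.Int.floordiv total_seats seats_per_coupe) 1).foldl
    (fun st coupe_num =>
      let start_seat := coupe_num * seats_per_coupe + 1
      let coupe_seats : PySem.Set Int :=
        PySem.Set.ofList ((PySem.List.pyRange 0 seats_per_coupe 1).map (fun i => start_seat + i))
      let free_in_coupe := PySem.Set.inter coupe_seats free_seats_set
      let free_count := PySem.Set.len free_in_coupe
      if free_count == 4 then (st.1 ++ [coupe_num + 1], st.2.1, st.2.2)
      else if free_count == 3 then (st.1, st.2.1 ++ [coupe_num + 1], st.2.2)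
      else if free_count == 2 then (st.1, st.2.1, st.2.2 ++ [coupe_num + 1])
      else st)
    ([], [], [])

-- ===== PORT B =====
def find_free_coupes_alt (free_seats : List Int) (total_seats : Int) : List Int × List Int × List Int :=
  let num_coupes := PySem.Int.floordiv total_seats 4
  let counts : PySem.Dict Int Int :=
    (PySem.Set.ofList free_seats).foldl
      (fun d seat =>
        if 1 ≤ seat ∧ seat ≤ num_coupes * 4 then
          let c := PySem.Int.floordiv (seat - 1) 4
          d.insert c (d.getD c 0 + 1)
        else d)
      PySem.Dict.empty
  (PySem.List.pyRange 0 num_coupes 1).foldl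
    (fun st coupe_num =>
      let n := counts.getD coupe_num 0
      if n == 4 then (st.1 ++ [coupe_num + 1], st.2.1, st.2.2)
      else if n == 3 then (st.1, st.2.1 ++ [coupe_num + 1], st.2.2)
      else if n == 2 then (st.1, st.2.1, st.2.2 ++ [coupe_num + 1])
      else st)
    ([], [], [])

-- ===== PRECONDITION & SPEC =====
def Spec_find_free_coupes (free_seats : List Int) (total_seats : Int) (out : List Int × List Int × List Int) : Prop := out = find_free_coupes_alt free_seats total_seats
instance (free_seats : List Int) (total_seats : Int) (out : List Int × List Int × List Int) : Decidable (Spec_find_free_coupes free_seats total_seats out) := by unfold Spec_find_free_coupes; infer_instance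

-- ===== CLAIM (what is proved, stated in full; the proofs are below) =====
def Claim_equal_find_free_coupes : Prop := ∀ (free_seats : List Int) (total_seats : Int), Dom_find_free_coupes free_seats total_seats → Spec_find_free_coupes free_seats total_seats (find_free_coupes free_seats total_seats)

-- ===== LEMMAS AND PROOFS =====

-- a guarded counting fold is the unguarded counting fold over the filtered, key-mapped list
theorem foldl_guard_insert (l : List Int) (p : Int → Prop) [DecidablePred p] (f : Int → Int)
    (d : PySem.Dict Int Int) :
    l.foldl (fun d x => if p x then d.insert (f x) (d.getD (f x) 0 + 1) else d) d
      = ((l.filter (fun x => decide (p x))).map f).foldl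
          (fun d k => d.insert k (d.getD k 0 + 1)) d := by
  induction l generalizing d with
  | nil => rfl
  | cons x xs ih => by_cases hx : p x <;> simp [hx, ih]

-- two duplicate-free lists count each other's members equally
theorem countP_mem_comm (l₁ l₂ : List Int) (h₁ : l₁.Nodup) (h₂ : l₂.Nodup) :
    l₁.countP (fun x => decide (x ∈ l₂)) = l₂.countP (fun x => decide (x ∈ l₁)) := by
  have hperm : (l₁.filter (fun x => decide (x ∈ l₂))).Perm (l₂.filter (fun x => decide (x ∈ l₁))) := by
    rw [List.perm_ext_iff_of_nodup (h₁.filter _) (h₂.filter _)]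
    intro a; simp [List.mem_filter, and_comm]
  simpa [List.countP_eq_length_filter] using hperm.length_eq

theorem count_map_eq (l : List Int) (f : Int → Int) (c : Int) :
    (l.map f).count c = l.countP (fun x => f x == c) := by
  simp [List.count, List.countP_map]; rfl

-- the per-coupe count of A (set intersection size) equals B's tally-dict entry, for 0 ≤ c < n
theorem count_agree (free_seats : List Int) (n c : Int) (hc0 : 0 ≤ c) (hcn : c < n) :
    ((PySem.Set.len (PySem.Set.inter
        (PySem.Set.ofList ((PySem.List.pyRange 0 4 1).map (fun i => c * 4 + 1 + i)))
        (PySem.Set.ofList free_seats))) : Int)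
      = ((PySem.Set.ofList free_seats).foldl
          (fun d seat =>
            if 1 ≤ seat ∧ seat ≤ n * 4 then
              d.insert (PySem.Int.floordiv (seat - 1) 4)
                ((d.getD (PySem.Int.floordiv (seat - 1) 4) 0) + 1)
            else d)
          PySem.Dict.empty).getD c 0 := by
  rw [foldl_guard_insert _ (fun seat => 1 ≤ seat ∧ seat ≤ n * 4) (fun seat => PySem.Int.floordiv (seat - 1) 4),
      PySem.Dict.getD_foldl_insert_add_one, PySem.Dict.getD_empty, zero_add,
      count_map_eq, List.countP_filter]
  have hL : ((PySem.List.pyRange 0 4 1).map (fun i => c * 4 + 1 + i))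
      = [c*4+1+0, c*4+1+1, c*4+1+2, c*4+1+3] := by
    have h4 : PySem.List.pyRange 0 4 1 = [0,1,2,3] := by decide
    rw [h4]; rfl
  rw [hL]
  simp only [PySem.Set.inter, PySem.Set.len, PySem.Set.contains_eq_listContains, List.contains_eq_mem,
             ← List.countP_eq_length_filter]
  rw [countP_mem_comm _ _ (PySem.Set.nodup_ofList _) (PySem.Set.nodup_ofList _)]
  congr 1
  apply List.countP_congr
  intro x _
  have hdiv := PySem.Int.floordiv_eq_iff_of_pos (a := x - 1) (b := 4) (q := c) (by norm_num)
  simp only [PySem.Set.mem_ofList]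
  simp only [decide_eq_true_eq, Bool.and_eq_true, beq_iff_eq, List.mem_cons, List.not_mem_nil,
      or_false, hdiv]
  omega

theorem ports_eq (fs : List Int) (ts : Int) : find_free_coupes fs ts = find_free_coupes_alt fs ts := by
  unfold find_free_coupes find_free_coupes_alt
  apply PySem.List.foldl_congr_mem
  intro acc c hcmem
  rcases (PySem.List.mem_pyRange_one).1 hcmem with ⟨hc0, hcn⟩
  have hc := count_agree fs (PySem.Int.floordiv ts 4) c hc0 hcn
  dsimp only
  rw [hc]

-- ===== VERDICT (by name: the statement is the Claim_ definition above) =====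
theorem find_free_coupes_spec : Claim_equal_find_free_coupes := by
  intro free_seats total_seats _
  unfold Spec_find_free_coupes
  exact ports_eq free_seats total_seats
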